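-- pv_equiv track=rewrite | github.com/reebxu459/aoc_2025 | day3/prog.py | get_largest_joltage_1
-- ===== SOURCE A (Python) =====
-- import string
--
-- def get_largest_joltage_1(batteries):
--     batteries = ''.join(batteries)
--     first, second = '0', '0'
--     subst = batteries[:-1]
--     for num in string.digits[::-1]:
--         idx = subst.find(num)
--         if idx != -1:
--             first = idx
--             break
--     subst = batteries[idx+1:]
--     for num in string.digits[::-1]:
--         sec_idx = subst.find(num)
--         if sec_idx != -1:
--             second = sec_idx + idx + 1
--             break
--     return batteries[first]+batteries[second]
-- ===== SOURCE B (Python) =====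
-- def _leftmost_max_digit(chunk):
--     best, pos = '', -1
--     for i, c in enumerate(chunk):
--         if c.isdigit() and c > best:
--             best, pos = c, i
--     return pos
--
-- def get_largest_joltage_1(batteries):
--     s = ''.join(batteries)
--     idx = _leftmost_max_digit(s[:-1])
--     jdx = _leftmost_max_digit(s[idx + 1:])
--     return s[idx] + s[jdx + idx + 1]
-- ===== Notes on version B (the rewrite author's own statement) =====
-- stated objective: simpler
-- what changed: Each of A's two digit searches (ten reverse-order str.find passes, one per digit character, with break) is replaced by a helper doing a single left-to-right scan that tracks the largest digit seen and its leftmost index.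
import Mathlib
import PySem

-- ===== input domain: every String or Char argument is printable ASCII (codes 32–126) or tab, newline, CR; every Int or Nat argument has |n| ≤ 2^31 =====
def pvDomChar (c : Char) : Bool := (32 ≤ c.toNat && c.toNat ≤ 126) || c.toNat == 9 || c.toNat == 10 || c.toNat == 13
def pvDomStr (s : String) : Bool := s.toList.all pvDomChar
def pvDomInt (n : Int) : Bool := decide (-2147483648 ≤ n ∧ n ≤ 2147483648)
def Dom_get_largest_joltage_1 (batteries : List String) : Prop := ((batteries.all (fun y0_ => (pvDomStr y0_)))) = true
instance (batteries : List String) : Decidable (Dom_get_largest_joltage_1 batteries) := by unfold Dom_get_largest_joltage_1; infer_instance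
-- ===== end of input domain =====

-- B replaces A's ten find-passes per scan by one linear scan tracking the largest digit seen (simpler; return-value equivalence only).

-- ===== PORT A =====
-- string.digits[::-1]
def pvDigitsRev : List Char := ['9', '8', '7', '6', '5', '4', '3', '2', '1', '0']

-- the 'for num in string.digits[::-1]: idx = subst.find(num); if idx != -1: break' loop;
-- returns the final value of the Python variable idx (-1 when every find failed, as find('0') then left -1)
def pvFindLoop (subst : List Char) : List Char → Int
  | [] => -1
  | d :: rest =>
      let i := PySem.Chars.find subst [d]
      if i ≠ -1 then i else pvFindLoop subst rest

-- batteries[o] as a char list; none models the int variable still holding the str '0'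
-- (Python then raises TypeError) and an out-of-range index (IndexError); both are outside Pre_
def pvCharAtA (s : List Char) (o : Option Int) : List Char :=
  match o with
  | none => []
  | some i =>
      match PySem.List.pyGet? s i with
      | some c => [c]
      | none => []

def get_largest_joltage_1 (batteries : List String) : String :=
  let s : List Char := (batteries.map String.toList).flatten  -- ''.join(batteries), exact: concatenation of code points
  let subst := s.dropLast                                     -- batteries[:-1]
  let idx := pvFindLoop subst pvDigitsRev
  let first : Option Int := if idx ≠ -1 then some idx else none
  let subst2 := PySem.List.slice s (some (idx + 1)) none      -- batteries[idx+1:]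
  let sec := pvFindLoop subst2 pvDigitsRev
  let second : Option Int := if sec ≠ -1 then some (sec + idx + 1) else none
  String.ofList (pvCharAtA s first ++ pvCharAtA s second)         -- batteries[first]+batteries[second]

-- ===== PORT B =====
-- c > best where best is '' (none) or a single digit char
def pvGtB (c : Char) (best : Option Char) : Bool :=
  match best with
  | none => true
  | some b => decide (b < c)

-- the 'for i, c in enumerate(chunk)' loop of _leftmost_max_digit, state (best, pos)
def pvScan : List Char → Nat → Option Char × Int → Option Char × Int
  | [], _, st => st
  | c :: rest, i, (best, pos) =>
      if PySem.Chars.isdigit c && pvGtB c best then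
        pvScan rest (i + 1) (some c, (i : Int))
      else
        pvScan rest (i + 1) (best, pos)

def pvLeftmostMaxDigit (chunk : List Char) : Int :=
  (pvScan chunk 0 (none, -1)).2

def get_largest_joltage_1_alt (batteries : List String) : String :=
  let s : List Char := (batteries.map String.toList).flatten  -- ''.join(batteries)
  let idx := pvLeftmostMaxDigit s.dropLast                    -- s[:-1]
  let jdx := pvLeftmostMaxDigit (PySem.List.slice s (some (idx + 1)) none)  -- s[idx+1:]
  let at_ : Int → List Char := fun i =>                        -- s[i] (none = IndexError, outside Pre_)
    match PySem.List.pyGet? s i with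
    | some c => [c]
    | none => []
  String.ofList (at_ idx ++ at_ (jdx + idx + 1))                  -- s[idx] + s[jdx + idx + 1]

-- ===== PRECONDITION & SPEC =====
-- the largest digit character of l, if l contains a digit
def pvMaxDigit? (l : List Char) : Option Char :=
  (l.filter PySem.Chars.isdigit).max?

-- Pre_ = exactly the inputs on which A returns: the joined string without its last character
-- must contain a digit, and a digit must occur after the leftmost occurrence of the largest
-- digit of that prefix (otherwise A raises TypeError from the '0' sentinels).
def Pre_get_largest_joltage_1 (batteries : List String) : Prop :=
  (let s : List Char := (batteries.map String.toList).flatten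
   match pvMaxDigit? s.dropLast with
   | none => false
   | some m => (s.drop (s.dropLast.idxOf m + 1)).any PySem.Chars.isdigit) = true

instance (batteries : List String) : Decidable (Pre_get_largest_joltage_1 batteries) := by
  unfold Pre_get_largest_joltage_1; infer_instance

def pvWitness_get_largest_joltage_1 : List String := ["9", "1"]

def Spec_get_largest_joltage_1 (batteries : List String) (out : String) : Prop := out = get_largest_joltage_1_alt batteries
instance (batteries : List String) (out : String) : Decidable (Spec_get_largest_joltage_1 batteries out) := by unfold Spec_get_largest_joltage_1; infer_instance

-- ===== CLAIM (what is proved, stated in full; the proofs are below) =====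
def Claim_equal_get_largest_joltage_1 : Prop := ∀ (batteries : List String), Dom_get_largest_joltage_1 batteries → Pre_get_largest_joltage_1 batteries → Spec_get_largest_joltage_1 batteries (get_largest_joltage_1 batteries)

-- ===== LEMMAS AND PROOFS =====

-- l.idxOf d from a least-index characterisation
theorem pv_idxOf_eq {l : List Char} {t : Nat} {d : Char}
    (h1 : l[t]? = some d) (h2 : ∀ i, i < t → l[i]? ≠ some d) : l.idxOf d = t := by
  induction l generalizing t with
  | nil => simp at h1
  | cons c rest ih =>
    cases t with
    | zero =>
      simp at h1
      simp [h1]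
    | succ n =>
      have hc : c ≠ d := by
        intro h; exact h2 0 (Nat.succ_pos n) (by simp [h])
      have : rest.idxOf d = n := by
        apply ih
        · simpa using h1
        · intro i hi hmem
          exact h2 (i + 1) (by omega) (by simpa using hmem)
      simp [hc, this]

-- [d] <+: xs ↔ xs starts with d
theorem pv_singleton_prefix {d : Char} {xs : List Char} : [d] <+: xs ↔ xs[0]? = some d := by
  constructor
  · rintro ⟨t, rfl⟩; simp
  · intro h
    cases xs with
    | nil => simp at h
    | cons c rest => simp at h; exact ⟨rest, by simp [h]⟩

-- find of a single char: the leftmost index, or -1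
theorem pv_find_singleton_not_mem {l : List Char} {d : Char} (h : d ∉ l) :
    PySem.Chars.find l [d] = -1 := by
  rw [PySem.Chars.find_eq_neg_one_iff]
  intro hinf
  exact h (hinf.subset (by simp))

theorem pv_find_singleton_mem {l : List Char} {d : Char} (h : d ∈ l) :
    PySem.Chars.find l [d] = (l.idxOf d : Int) := by
  have hinf : [d] <:+: l := by
    obtain ⟨s, t, rfl⟩ := List.append_of_mem h
    exact ⟨s, t, by simp⟩
  have hpos : 0 ≤ PySem.Chars.find l [d] := (PySem.Chars.find_nonneg_iff l [d]).2 hinf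
  obtain ⟨hpre, hmin⟩ := PySem.Chars.find_spec hpos
  have h1 : l[(PySem.Chars.find l [d]).toNat]? = some d := by
    have := pv_singleton_prefix.1 hpre
    simpa using this
  have h2 : ∀ i, i < (PySem.Chars.find l [d]).toNat → l[i]? ≠ some d := by
    intro i hi hmem
    apply hmin i hi
    rw [pv_singleton_prefix]
    simpa using hmem
  have := pv_idxOf_eq h1 h2
  omega

-- digits are exactly the members of pvDigitsRev
theorem pv_isdigit_iff_mem {c : Char} : PySem.Chars.isdigit c = true ↔ c ∈ pvDigitsRev := by
  constructor
  · intro h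
    have hn : 48 ≤ c.toNat ∧ c.toNat ≤ 57 := by
      simp [PySem.Chars.isdigit, Char.le_def, UInt32.le_iff_toNat_le] at h
      exact ⟨h.1, h.2⟩
    have : c.toNat = 48 ∨ c.toNat = 49 ∨ c.toNat = 50 ∨ c.toNat = 51 ∨ c.toNat = 52 ∨
        c.toNat = 53 ∨ c.toNat = 54 ∨ c.toNat = 55 ∨ c.toNat = 56 ∨ c.toNat = 57 := by omega
    have hc : ∀ n : Nat, c.toNat = n → c = Char.ofNat n := by
      intro n hn'
      have : Char.ofNat c.toNat = c := Char.ofNat_toNat c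
      rw [← hn']; exact this.symm
    rcases this with h' | h' | h' | h' | h' | h' | h' | h' | h' | h' <;>
      · rw [hc _ h']; decide
  · intro h
    fin_cases h <;> decide

-- max-digit facts
theorem pv_maxDigit_some {l : List Char} {m : Char} (h : pvMaxDigit? l = some m) :
    m ∈ l ∧ PySem.Chars.isdigit m = true ∧ ∀ c ∈ l, PySem.Chars.isdigit c = true → c ≤ m := by
  unfold pvMaxDigit? at h
  obtain ⟨hmem, hle⟩ := List.max?_eq_some_iff.1 h
  refine ⟨(List.mem_filter.1 hmem).1, (List.mem_filter.1 hmem).2, ?_⟩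
  intro c hc hd
  exact hle c (List.mem_filter.2 ⟨hc, hd⟩)

theorem pv_maxDigit_none {l : List Char} (h : pvMaxDigit? l = none) :
    ∀ c ∈ l, PySem.Chars.isdigit c = false := by
  unfold pvMaxDigit? at h
  rw [List.max?_eq_none_iff] at h
  intro c hc
  by_contra hne
  have : c ∈ l.filter PySem.Chars.isdigit := List.mem_filter.2 ⟨hc, by simpa using hne⟩
  rw [h] at this
  simp at this

-- A's loop when no candidate digit is present
theorem pv_findLoop_none : ∀ (ds l : List Char), (∀ d ∈ ds, d ∉ l) → pvFindLoop l ds = -1 := by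
  intro ds
  induction ds with
  | nil => intro l _; rfl
  | cons d rest ih =>
    intro l h
    have hd : d ∉ l := h d (by simp)
    simp only [pvFindLoop, pv_find_singleton_not_mem hd]
    simpa using ih l (fun x hx => h x (by simp [hx]))

-- A's loop hits the maximum present digit first (ds strictly descending)
theorem pv_findLoop_max : ∀ (ds l : List Char) (m : Char), ds.Pairwise (· > ·) → m ∈ ds → m ∈ l →
    (∀ d ∈ ds, d ∈ l → d ≤ m) → pvFindLoop l ds = (l.idxOf m : Int) := by
  intro ds
  induction ds with
  | nil => intro l m _ hm; simp at hm
  | cons d rest ih =>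
    intro l m hpw hm hml hmax
    by_cases hdm : d = m
    · subst hdm
      have : PySem.Chars.find l [d] = (l.idxOf d : Int) := pv_find_singleton_mem hml
      simp only [pvFindLoop, this]
      have : ¬ ((l.idxOf d : Int) = -1) := by omega
      simp [this]
    · have hmrest : m ∈ rest := by
        rcases List.mem_cons.1 hm with h | h
        · exact absurd h.symm hdm
        · exact h
      have hdgt : d > m := (List.pairwise_cons.1 hpw).1 m hmrest
      have hdnl : d ∉ l := by
        intro hdl
        have := hmax d (by simp) hdl
        exact absurd this (not_le.2 hdgt)
      simp only [pvFindLoop, pv_find_singleton_not_mem hdnl]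
      simpa using ih l m (List.pairwise_cons.1 hpw).2 hmrest hml
        (fun x hx hxl => hmax x (by simp [hx]) hxl)

-- A's loop characterisation
theorem pv_findLoop_eq (l : List Char) :
    pvFindLoop l pvDigitsRev =
      (match pvMaxDigit? l with
       | none => (-1 : Int)
       | some m => (l.idxOf m : Int)) := by
  cases h : pvMaxDigit? l with
  | none =>
    have hno := pv_maxDigit_none h
    apply pv_findLoop_none
    intro d hd hdl
    have : PySem.Chars.isdigit d = true := pv_isdigit_iff_mem.2 hd
    rw [hno d hdl] at this
    simp at this
  | some m =>
    obtain ⟨hml, hmd, hmax⟩ := pv_maxDigit_some h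
    apply pv_findLoop_max
    · decide
    · exact pv_isdigit_iff_mem.1 hmd
    · exact hml
    · intro d hd hdl
      exact hmax d hdl (pv_isdigit_iff_mem.2 hd)

-- B's scan when nothing can update the state
theorem pv_scan_none : ∀ (l : List Char) (i : Nat) (b : Option Char) (p : Int),
    (∀ c ∈ l, ¬ (PySem.Chars.isdigit c = true ∧ pvGtB c b = true)) →
    pvScan l i (b, p) = (b, p) := by
  intro l
  induction l with
  | nil => intro i b p _; rfl
  | cons c rest ih =>
    intro i b p h
    have hc : ¬ (PySem.Chars.isdigit c = true ∧ pvGtB c b = true) := h c (by simp)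
    have : (PySem.Chars.isdigit c && pvGtB c b) = false := by
      cases h1 : PySem.Chars.isdigit c <;> cases h2 : pvGtB c b <;>
        simp [h1, h2] at hc ⊢
    simp only [pvScan, this, Bool.false_eq_true, if_false]
    exact ih (i + 1) b p (fun x hx => h x (by simp [hx]))

-- B's scan finds the leftmost occurrence of the largest qualifying digit
theorem pv_scan_max : ∀ (l : List Char) (i : Nat) (b : Option Char) (p : Int) (m : Char),
    m ∈ l → PySem.Chars.isdigit m = true → pvGtB m b = true →
    (∀ c ∈ l, PySem.Chars.isdigit c = true → pvGtB c b = true → c ≤ m) →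
    pvScan l i (b, p) = (some m, (i : Int) + (l.idxOf m : Int)) := by
  intro l
  induction l with
  | nil => intro i b p m hm; simp at hm
  | cons c rest ih =>
    intro i b p m hm hmd hmgt hmax
    by_cases hcm : c = m
    · subst hcm
      have hcond : (PySem.Chars.isdigit c && pvGtB c b) = true := by simp [hmd, hmgt]
      simp only [pvScan, hcond, if_true]
      have : pvScan rest (i + 1) (some c, (i : Int)) = (some c, (i : Int)) := by
        apply pv_scan_none
        rintro x hx ⟨hxd, hxgt⟩
        have hxc : c < x := by simpa [pvGtB] using hxgt
        have hxle : x ≤ c := by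
          apply hmax x (by simp [hx]) hxd
          cases b with
          | none => rfl
          | some v =>
            have hvc : v < c := by simpa [pvGtB] using hmgt
            simp [pvGtB]; exact lt_trans hvc hxc
        exact absurd hxc (not_lt.2 hxle)
      rw [this]
      simp
    · have hmrest : m ∈ rest := by
        rcases List.mem_cons.1 hm with h | h
        · exact absurd h.symm hcm
        · exact h
      have hidx : ((c :: rest).idxOf m : Int) = (rest.idxOf m : Int) + 1 := by
        have hne : c ≠ m := hcm
        simp [hne]
      by_cases hcond : (PySem.Chars.isdigit c && pvGtB c b) = true
      · -- c updates the state; m is still strictly bigger than c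
        obtain ⟨hcd, hcb⟩ : PySem.Chars.isdigit c = true ∧ pvGtB c b = true := by
          simpa using hcond
        have hcle : c ≤ m := hmax c (by simp) hcd hcb
        have hclt : c < m := lt_of_le_of_ne hcle hcm
        simp only [pvScan, hcond, if_true]
        have := ih (i + 1) (some c) (i : Int) m hmrest hmd
          (by simp [pvGtB]; exact hclt)
          (by
            intro x hx hxd hxgt
            have hcx : c < x := by simpa [pvGtB] using hxgt
            apply hmax x (by simp [hx]) hxd
            cases b with
            | none => rfl
            | some v =>
              have hvc : v < c := by simpa [pvGtB] using hcb
              simp [pvGtB]; exact lt_trans hvc hcx)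
        rw [this, hidx]
        push_cast
        ring_nf
      · have hfalse : (PySem.Chars.isdigit c && pvGtB c b) = false := by
          simpa using hcond
        simp only [pvScan, hfalse, Bool.false_eq_true, if_false]
        have := ih (i + 1) b p m hmrest hmd hmgt
          (fun x hx hxd hxgt => hmax x (by simp [hx]) hxd hxgt)
        rw [this, hidx]
        push_cast
        ring_nf

-- B's scan characterisation
theorem pv_leftmost_eq (l : List Char) :
    pvLeftmostMaxDigit l =
      (match pvMaxDigit? l with
       | none => (-1 : Int)
       | some m => (l.idxOf m : Int)) := by
  unfold pvLeftmostMaxDigit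
  cases h : pvMaxDigit? l with
  | none =>
    have hno := pv_maxDigit_none h
    rw [pv_scan_none l 0 none (-1) (by
      rintro c hc ⟨hcd, _⟩
      rw [hno c hc] at hcd
      simp at hcd)]
  | some m =>
    obtain ⟨hml, hmd, hmax⟩ := pv_maxDigit_some h
    rw [pv_scan_max l 0 none (-1) m hml hmd rfl (fun c hc hcd _ => hmax c hc hcd)]
    simp

-- any isdigit ↔ pvMaxDigit? is some
theorem pv_any_iff_maxDigit {l : List Char} :
    l.any PySem.Chars.isdigit = true ↔ pvMaxDigit? l ≠ none := by
  unfold pvMaxDigit?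
  rw [Ne, List.max?_eq_none_iff]
  constructor
  · intro h hempty
    obtain ⟨c, hc, hcd⟩ := List.any_eq_true.1 h
    have : c ∈ l.filter PySem.Chars.isdigit := List.mem_filter.2 ⟨hc, hcd⟩
    rw [hempty] at this
    simp at this
  · intro h
    cases hf : l.filter PySem.Chars.isdigit with
    | nil => exact absurd hf h
    | cons c cs =>
      have hc : c ∈ l.filter PySem.Chars.isdigit := by rw [hf]; exact List.mem_cons_self
      exact List.any_eq_true.2 ⟨c, (List.mem_filter.1 hc).1, (List.mem_filter.1 hc).2⟩

-- ===== VERDICT (by name: the statement is the Claim_ definition above) =====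
theorem pv_main : ∀ (batteries : List String), Pre_get_largest_joltage_1 batteries →
    get_largest_joltage_1 batteries = get_largest_joltage_1_alt batteries := by
  intro batteries hpre
  simp only [Pre_get_largest_joltage_1] at hpre
  simp only [get_largest_joltage_1, get_largest_joltage_1_alt]
  cases hmax : pvMaxDigit? ((batteries.map String.toList).flatten).dropLast with
  | none => rw [hmax] at hpre; simp at hpre
  | some m =>
    rw [hmax] at hpre
    have hA1 : pvFindLoop ((batteries.map String.toList).flatten).dropLast pvDigitsRev =
        (((batteries.map String.toList).flatten).dropLast.idxOf m : Int) := by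
      rw [pv_findLoop_eq, hmax]
    have hB1 : pvLeftmostMaxDigit ((batteries.map String.toList).flatten).dropLast =
        (((batteries.map String.toList).flatten).dropLast.idxOf m : Int) := by
      rw [pv_leftmost_eq, hmax]
    rw [hA1, hB1]
    have hslice : PySem.List.slice ((batteries.map String.toList).flatten)
        (some ((((batteries.map String.toList).flatten).dropLast.idxOf m : Int) + 1)) none =
        ((batteries.map String.toList).flatten).drop
          (((batteries.map String.toList).flatten).dropLast.idxOf m + 1) := by
      have hcast : ((((batteries.map String.toList).flatten).dropLast.idxOf m : Int) + 1) =
          (((((batteries.map String.toList).flatten).dropLast.idxOf m) + 1 : Nat) : Int) := by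
        push_cast; ring
      rw [hcast, PySem.List.slice_from_natCast]
    rw [hslice]
    obtain ⟨m2, hmax2⟩ := Option.ne_none_iff_exists'.1 (pv_any_iff_maxDigit.1 hpre)
    have hA2 : pvFindLoop (((batteries.map String.toList).flatten).drop
        (((batteries.map String.toList).flatten).dropLast.idxOf m + 1)) pvDigitsRev =
        ((((batteries.map String.toList).flatten).drop
          (((batteries.map String.toList).flatten).dropLast.idxOf m + 1)).idxOf m2 : Int) := by
      rw [pv_findLoop_eq, hmax2]
    have hB2 : pvLeftmostMaxDigit (((batteries.map String.toList).flatten).drop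
        (((batteries.map String.toList).flatten).dropLast.idxOf m + 1)) =
        ((((batteries.map String.toList).flatten).drop
          (((batteries.map String.toList).flatten).dropLast.idxOf m + 1)).idxOf m2 : Int) := by
      rw [pv_leftmost_eq, hmax2]
    rw [hA2, hB2]
    have h1 : ¬ ((((batteries.map String.toList).flatten).dropLast.idxOf m : Int) = -1) := by omega
    have h2 : ¬ (((((batteries.map String.toList).flatten).drop
        (((batteries.map String.toList).flatten).dropLast.idxOf m + 1)).idxOf m2 : Int) = -1) := by omega
    simp only [h1, h2, ne_eq, not_false_eq_true, if_true]
    simp [pvCharAtA]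

-- ===== VERDICT (by name: the statement is the Claim_ definition above) =====
theorem get_largest_joltage_1_spec : Claim_equal_get_largest_joltage_1 := by
  intro batteries _ hpre
  exact pv_main batteries hpre
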